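-- pv_equiv track=rewrite | github.com/kameronyork/kameronyork.github.io | projects/conference/python-scripts/reference-streaks.py | current_streak
-- ===== SOURCE A (Python) =====
-- def current_streak(series):
--     series = series[::-1]  # Reverse the series to start from the most recent conference
--     streak = 0
--     for value in series:
--         if value == 1:
--             streak += 1
--         else:
--             break
--     return streak
-- ===== SOURCE B (Python) =====
-- def current_streak(series):
--     streak = 0
--     for value in series:
--         if value == 1:
--             streak += 1
--         else:
--             streak = 0
--     return streak
-- ===== Notes on version B (the rewrite author's own statement) =====
-- stated objective: simpler
-- what changed: Single forward pass with a reset-on-mismatch counter replaces reversing the list and counting leading 1s with an early break.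
import Mathlib
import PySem

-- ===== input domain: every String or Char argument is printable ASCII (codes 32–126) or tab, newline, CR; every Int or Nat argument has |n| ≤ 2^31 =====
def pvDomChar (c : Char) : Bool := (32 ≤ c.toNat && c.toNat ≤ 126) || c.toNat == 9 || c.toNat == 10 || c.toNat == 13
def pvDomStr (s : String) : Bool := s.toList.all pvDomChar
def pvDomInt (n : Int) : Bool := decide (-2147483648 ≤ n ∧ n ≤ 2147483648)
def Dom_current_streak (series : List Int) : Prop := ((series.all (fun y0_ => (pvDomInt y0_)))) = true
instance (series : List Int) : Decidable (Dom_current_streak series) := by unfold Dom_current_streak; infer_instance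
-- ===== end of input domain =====

-- B replaces A's reverse-then-break scan with a single forward pass using a reset-on-mismatch counter (objective: simpler).


-- ===== PORT A =====
-- A's loop with break over the reversed list: count leading 1s, stop at the first non-1.
def countLeadOnes : List Int → Int
  | [] => 0
  | v :: rest => if v = 1 then countLeadOnes rest + 1 else 0

def current_streak (series : List Int) : Int :=
  countLeadOnes series.reverse

-- ===== PORT B =====
def current_streak_alt (series : List Int) : Int :=
  series.foldl (fun streak value => if value = 1 then streak + 1 else 0) 0

-- ===== PRECONDITION & SPEC =====
def Spec_current_streak (series : List Int) (out : Int) : Prop := out = current_streak_alt series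
instance (series : List Int) (out : Int) : Decidable (Spec_current_streak series out) := by unfold Spec_current_streak; infer_instance

-- ===== CLAIM (what is proved, stated in full; the proofs are below) =====
def Claim_equal_current_streak : Prop := ∀ (series : List Int), Dom_current_streak series → Spec_current_streak series (current_streak series)

-- ===== LEMMAS AND PROOFS =====
theorem countLeadOnes_append_one (ys : List Int) (x : Int) :
    countLeadOnes (ys ++ [x]) =
      if ys.all (· = 1) then countLeadOnes ys + (if x = 1 then 1 else 0)
      else countLeadOnes ys := by
  induction ys with
  | nil => simp [countLeadOnes]
  | cons y ys ih =>
    by_cases hy : y = 1 <;> simp [countLeadOnes, hy, ih] <;> split_ifs <;> ring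

theorem all_reverse_one (xs : List Int) : xs.reverse.all (· = 1) = xs.all (· = 1) := by
  simp [List.all_reverse]

theorem foldB_eq (xs : List Int) (a : Int) :
    xs.foldl (fun streak value => if value = 1 then streak + 1 else 0) a =
      if xs.all (· = 1) then a + countLeadOnes xs.reverse else countLeadOnes xs.reverse := by
  induction xs generalizing a with
  | nil => simp [countLeadOnes]
  | cons x xs ih =>
    simp only [List.foldl_cons, ih, List.reverse_cons, countLeadOnes_append_one,
      all_reverse_one, List.all_cons]
    by_cases hx : x = 1 <;> by_cases hall : xs.all (· = 1) = true <;>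
      simp [hx, hall] <;> ring

-- ===== VERDICT (by name: the statement is the Claim_ definition above) =====
theorem current_streak_spec : Claim_equal_current_streak := by
  intro series _
  unfold Spec_current_streak current_streak current_streak_alt
  rw [foldB_eq]
  split_ifs <;> simp
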